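-- pv_equiv track=rewrite | github.com/kshoop27/shoopcodes | binarynumbers/bin1.py | numToTernary
-- ===== SOURCE A (Python) =====
-- def numToTernary(N):
--     if N == 0:
--         return ''
--     elif N % 3 == 2:
--         return numToTernary(N // 3) + '2'
--     elif N % 3 == 1:
--         return numToTernary(N // 3) + '1'
--     else:
--         return numToTernary(N // 3) + '0'
-- ===== SOURCE B (Python) =====
-- def numToTernary(N):
--     if N == 0:
--         return ''
--     digits = []
--     while N:
--         N, r = divmod(N, 3)
--         digits.append(str(r))
--     return ''.join(reversed(digits))
-- ===== Notes on version B (the rewrite author's own statement) =====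
-- stated objective: idiomatic
-- what changed: Replaces the recursive branch-per-digit construction with an iterative divmod loop collecting least-significant digits in a list and joining them reversed.
-- outside the precondition, e.g. on numToTernary(-1): A raises RecursionError, B does not finish within the time limit
import Mathlib
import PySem

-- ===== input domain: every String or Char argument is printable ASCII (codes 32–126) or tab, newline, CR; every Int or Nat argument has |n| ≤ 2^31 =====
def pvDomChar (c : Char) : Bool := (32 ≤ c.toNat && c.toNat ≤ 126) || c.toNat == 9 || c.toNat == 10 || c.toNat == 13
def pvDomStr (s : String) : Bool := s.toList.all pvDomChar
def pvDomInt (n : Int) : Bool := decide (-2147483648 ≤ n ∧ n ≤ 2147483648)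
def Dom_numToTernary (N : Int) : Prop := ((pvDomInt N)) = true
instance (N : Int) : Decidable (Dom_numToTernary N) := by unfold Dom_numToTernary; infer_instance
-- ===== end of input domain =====

-- B replaces A's recursive digit-by-digit string concatenation with an iterative divmod loop
-- that collects digits in a list and joins them reversed (more idiomatic, same result on N ≥ 0).


-- ===== PORT A =====
-- Literal port of A's recursion; the 'N < 0' guard only makes the function total
-- (Python A raises RecursionError there, outside Pre_).
def numToTernary (N : Int) : String :=
  if N = 0 then ""
  else if N < 0 then ""
  else if PySem.Int.mod N 3 = 2 then numToTernary (PySem.Int.floordiv N 3) ++ "2"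
  else if PySem.Int.mod N 3 = 1 then numToTernary (PySem.Int.floordiv N 3) ++ "1"
  else numToTernary (PySem.Int.floordiv N 3) ++ "0"
termination_by N.toNat
decreasing_by
  all_goals
    have h3 : (0:Int) < 3 := by omega
    rw [PySem.Int.floordiv_eq_ediv_of_pos h3]
    omega

-- ===== PORT B =====
-- the while-loop of Source B; the 'N < 0' guard only makes it total (Source B diverges there, outside Pre_)
def ternaryLoop (N : Int) (digits : List String) : List String :=
  if N = 0 then digits
  else if N < 0 then digits
  else ternaryLoop (PySem.Int.floordiv N 3) (digits ++ [PySem.Int.toStr (PySem.Int.mod N 3)])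
termination_by N.toNat
decreasing_by
  have h3 : (0:Int) < 3 := by omega
  rw [PySem.Int.floordiv_eq_ediv_of_pos h3]
  omega

def numToTernary_alt (N : Int) : String :=
  if N = 0 then ""
  else String.join (ternaryLoop N []).reverse

-- ===== PRECONDITION & SPEC =====
-- Pre_ excludes negative N: A raises RecursionError there (and Source B loops forever).
def Pre_numToTernary (N : Int) : Prop := 0 ≤ N
instance (N : Int) : Decidable (Pre_numToTernary N) := by unfold Pre_numToTernary; infer_instance
def pvWitness_numToTernary : Int := (42)
def Spec_numToTernary (N : Int) (out : String) : Prop := out = numToTernary_alt N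
instance (N : Int) (out : String) : Decidable (Spec_numToTernary N out) := by unfold Spec_numToTernary; infer_instance

-- ===== CLAIM (what is proved, stated in full; the proofs are below) =====
def Claim_equal_numToTernary : Prop := ∀ (N : Int), Dom_numToTernary N → Pre_numToTernary N → Spec_numToTernary N (numToTernary N)

-- ===== LEMMAS AND PROOFS =====

lemma foldr_append_init (s : String) (l : List String) :
    List.foldr (fun x y => y ++ x) s l = s ++ List.foldr (fun x y => y ++ x) "" l := by
  induction l with
  | nil => simp
  | cons a t ih => simp [List.foldr, ih, String.append_assoc]

lemma ternaryLoop_join (N : Int) (hN : 0 ≤ N) (digits : List String) :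
    String.join (ternaryLoop N digits).reverse
      = numToTernary N ++ String.join digits.reverse := by
  generalize hk : N.toNat = k
  induction k using Nat.strong_induction_on generalizing N digits with
  | _ k ih =>
    rw [ternaryLoop, numToTernary]
    by_cases h0 : N = 0
    · simp [h0]
    · have hpos : 0 < N := by omega
      have h3 : (0:Int) < 3 := by omega
      have hlt : ¬ N < 0 := by omega
      have hdiv : (PySem.Int.floordiv N 3).toNat < k := by
        rw [PySem.Int.floordiv_eq_ediv_of_pos h3]; omega
      have hdnn : 0 ≤ PySem.Int.floordiv N 3 := by
        rw [PySem.Int.floordiv_eq_ediv_of_pos h3]; omega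
      have hmlo : 0 ≤ PySem.Int.mod N 3 := PySem.Int.mod_nonneg _ h3
      have hmhi : PySem.Int.mod N 3 < 3 := PySem.Int.mod_lt _ h3
      rw [if_neg h0, if_neg hlt, if_neg h0, if_neg hlt]
      rw [ih _ hdiv _ hdnn _ rfl]
      interval_cases h : (PySem.Int.mod N 3) <;>
        simp_all [String.join] <;>
        rw [foldr_append_init, ← String.append_assoc] <;>
        congr 2

theorem numToTernary_spec : Claim_equal_numToTernary := by
  intro N _ hPre
  unfold Spec_numToTernary numToTernary_alt
  by_cases h0 : N = 0
  · simp [h0, numToTernary]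
  · rw [if_neg h0, ternaryLoop_join N hPre]
    simp [String.join]
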